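-- pv_equiv track=rewrite | github.com/tahira879/CAREER-GUIDANCE-PLATFORM | final_proj.py | apply_clean_format
-- ===== SOURCE A (Python) =====
-- def apply_clean_format(text):
--     h1c, h2c, h3c, tc = "#3D52A0","#7091E6","#8697C4","#334155"
--     lines = text.split('\n')
--     html_out = ""
--     in_list = False
--     for line in lines:
--         s = line.strip()
--         if s.startswith("- "):
--             if not in_list: html_out += "<ul style='list-style:none;padding-left:0;'>"
--             in_list = True
--             html_out += (f"<li style='margin-bottom:8px;padding-left:20px;position:relative;"
--                          f"color:{tc};line-height:1.6;'>"
--                          f"<span style='position:absolute;left:0;top:4px;color:{h2c};'>●</span> {s[2:]}</li>")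
--         else:
--             if in_list: html_out += "</ul>"; in_list = False
--             if s.startswith("### "):
--                 html_out += f"<h3 style='color:{h3c};border-bottom:2px solid {h3c};padding-bottom:5px;margin-top:25px;font-family:Syne,sans-serif;'>{s[4:]}</h3>"
--             elif s.startswith("## "):
--                 html_out += f"<h2 style='color:{h2c};border-bottom:2px solid {h2c};padding-bottom:5px;margin-top:30px;font-family:Syne,sans-serif;'>{s[3:]}</h2>"
--             elif s.startswith("# "):
--                 html_out += f"<h1 style='color:{h1c};border-bottom:3px solid {h1c};padding-bottom:8px;margin-top:35px;font-family:Syne,sans-serif;'>{s[2:]}</h1>"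
--             elif s:
--                 html_out += f"<p style='color:{tc};line-height:1.7;margin-bottom:15px;'>{s}</p>"
--     if in_list: html_out += "</ul>"
--     return html_out
-- ===== SOURCE B (Python) =====
-- H1C, H2C, H3C, TC = "#3D52A0", "#7091E6", "#8697C4", "#334155"
--
-- def _is_item(line):
--     return line.strip().startswith("- ")
--
-- def _li(line):
--     s = line.strip()
--     return ("<li style='margin-bottom:8px;padding-left:20px;position:relative;"
--             f"color:{TC};line-height:1.6;'>"
--             f"<span style='position:absolute;left:0;top:4px;color:{H2C};'>\u25cf</span> {s[2:]}</li>")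
--
-- def _block(line):
--     s = line.strip()
--     if s.startswith("### "):
--         return f"<h3 style='color:{H3C};border-bottom:2px solid {H3C};padding-bottom:5px;margin-top:25px;font-family:Syne,sans-serif;'>{s[4:]}</h3>"
--     if s.startswith("## "):
--         return f"<h2 style='color:{H2C};border-bottom:2px solid {H2C};padding-bottom:5px;margin-top:30px;font-family:Syne,sans-serif;'>{s[3:]}</h2>"
--     if s.startswith("# "):
--         return f"<h1 style='color:{H1C};border-bottom:3px solid {H1C};padding-bottom:8px;margin-top:35px;font-family:Syne,sans-serif;'>{s[2:]}</h1>"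
--     if s:
--         return f"<p style='color:{TC};line-height:1.7;margin-bottom:15px;'>{s}</p>"
--     return ""
--
-- def apply_clean_format(text):
--     lines = text.split('\n')
--     n = len(lines)
--     parts = []
--     i = 0
--     while i < n:
--         if _is_item(lines[i]):
--             j = i
--             while j < n and _is_item(lines[j]):
--                 j += 1
--             parts.append("<ul style='list-style:none;padding-left:0;'>")
--             parts.extend(_li(lines[k]) for k in range(i, j))
--             parts.append("</ul>")
--             i = j
--         else:
--             parts.append(_block(lines[i]))
--             i += 1
--     return "".join(parts)
-- ===== Notes on version B (the rewrite author's own statement) =====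
-- stated objective: alternative
-- what changed: Replaces A's stateful in_list flag threaded through one fold with a run-based scan: B consumes maximal runs of list-item lines (takewhile-style) and emits each whole <ul> block at once, rendering non-list lines with a pure per-line cascade, collecting parts and joining once.
import Mathlib
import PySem

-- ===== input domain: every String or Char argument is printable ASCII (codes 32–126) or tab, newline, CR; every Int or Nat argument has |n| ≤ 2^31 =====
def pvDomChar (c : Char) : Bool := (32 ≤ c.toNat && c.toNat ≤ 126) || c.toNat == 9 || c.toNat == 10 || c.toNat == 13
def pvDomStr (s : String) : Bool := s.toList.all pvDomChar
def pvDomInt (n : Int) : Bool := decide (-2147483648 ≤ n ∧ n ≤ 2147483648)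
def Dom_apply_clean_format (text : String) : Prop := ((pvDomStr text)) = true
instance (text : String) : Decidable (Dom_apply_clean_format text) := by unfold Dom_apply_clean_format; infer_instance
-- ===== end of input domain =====

-- B replaces A's in_list flag with a run-based scan (maximal runs of list items emitted as one <ul> block); same output, different decomposition.

-- ===== PORT A =====
-- A's loop body as a step on state (html_out, in_list); the trailing 'if in_list' close is applied after the fold.
def acfStepA (st : String × Bool) (line : String) : String × Bool :=
  let s := PySem.Str.strip line
  if PySem.Str.startswith s "- " then
    let st1 : String × Bool :=
      if !st.2 then (st.1 ++ "<ul style='list-style:none;padding-left:0;'>", st.2) else st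
    (st1.1 ++ ("<li style='margin-bottom:8px;padding-left:20px;position:relative;color:#334155;line-height:1.6;'><span style='position:absolute;left:0;top:4px;color:#7091E6;'>●</span> "
               ++ PySem.Str.slice s (some 2) none ++ "</li>"), true)
  else
    let st1 : String × Bool := if st.2 then (st.1 ++ "</ul>", false) else (st.1, st.2)
    if PySem.Str.startswith s "### " then
      (st1.1 ++ ("<h3 style='color:#8697C4;border-bottom:2px solid #8697C4;padding-bottom:5px;margin-top:25px;font-family:Syne,sans-serif;'>"
                 ++ PySem.Str.slice s (some 4) none ++ "</h3>"), false)
    else if PySem.Str.startswith s "## " then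
      (st1.1 ++ ("<h2 style='color:#7091E6;border-bottom:2px solid #7091E6;padding-bottom:5px;margin-top:30px;font-family:Syne,sans-serif;'>"
                 ++ PySem.Str.slice s (some 3) none ++ "</h2>"), false)
    else if PySem.Str.startswith s "# " then
      (st1.1 ++ ("<h1 style='color:#3D52A0;border-bottom:3px solid #3D52A0;padding-bottom:8px;margin-top:35px;font-family:Syne,sans-serif;'>"
                 ++ PySem.Str.slice s (some 2) none ++ "</h1>"), false)
    else if s ≠ "" then
      (st1.1 ++ ("<p style='color:#334155;line-height:1.7;margin-bottom:15px;'>" ++ s ++ "</p>"), false)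
    else
      (st1.1, false)

def apply_clean_format (text : String) : String :=
  let lines := (PySem.Str.split? text "\n").getD []
  let st := lines.foldl acfStepA ("", false)
  if st.2 then st.1 ++ "</ul>" else st.1

-- ===== PORT B =====
def acfIsItem (line : String) : Bool := PySem.Str.startswith (PySem.Str.strip line) "- "

def acfLiB (line : String) : String :=
  let s := PySem.Str.strip line
  "<li style='margin-bottom:8px;padding-left:20px;position:relative;color:#334155;line-height:1.6;'><span style='position:absolute;left:0;top:4px;color:#7091E6;'>●</span> "
    ++ PySem.Str.slice s (some 2) none ++ "</li>"

def acfBlockB (line : String) : String :=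
  let s := PySem.Str.strip line
  if PySem.Str.startswith s "### " then
    "<h3 style='color:#8697C4;border-bottom:2px solid #8697C4;padding-bottom:5px;margin-top:25px;font-family:Syne,sans-serif;'>"
      ++ PySem.Str.slice s (some 4) none ++ "</h3>"
  else if PySem.Str.startswith s "## " then
    "<h2 style='color:#7091E6;border-bottom:2px solid #7091E6;padding-bottom:5px;margin-top:30px;font-family:Syne,sans-serif;'>"
      ++ PySem.Str.slice s (some 3) none ++ "</h2>"
  else if PySem.Str.startswith s "# " then
    "<h1 style='color:#3D52A0;border-bottom:3px solid #3D52A0;padding-bottom:8px;margin-top:35px;font-family:Syne,sans-serif;'>"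
      ++ PySem.Str.slice s (some 2) none ++ "</h1>"
  else if s ≠ "" then
    "<p style='color:#334155;line-height:1.7;margin-bottom:15px;'>" ++ s ++ "</p>"
  else
    ""

-- ''.join(parts): explicit concatenation of the collected parts
def acfConcat : List String → String
  | [] => ""
  | s :: r => s ++ acfConcat r

-- B's outer while loop: each iteration consumes either one maximal run of list items or one non-list line.
def acfGoB : List String → String
  | [] => ""
  | l :: rest =>
    if acfIsItem l then
      "<ul style='list-style:none;padding-left:0;'>"
        ++ acfConcat (((l :: rest).takeWhile acfIsItem).map acfLiB)
        ++ "</ul>"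
        ++ acfGoB ((l :: rest).dropWhile acfIsItem)
    else
      acfBlockB l ++ acfGoB rest
termination_by l => l.length
decreasing_by
  · simp [*]
    exact List.length_dropWhile_le _ _
  · simp

def apply_clean_format_alt (text : String) : String :=
  let lines := (PySem.Str.split? text "\n").getD []
  acfGoB lines

-- ===== PRECONDITION & SPEC =====
def Spec_apply_clean_format (text : String) (out : String) : Prop := out = apply_clean_format_alt text
instance (text : String) (out : String) : Decidable (Spec_apply_clean_format text out) := by unfold Spec_apply_clean_format; infer_instance

-- ===== CLAIM (what is proved, stated in full; the proofs are below) =====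
def Claim_equal_apply_clean_format : Prop := ∀ (text : String), Dom_apply_clean_format text → Spec_apply_clean_format text (apply_clean_format text)

-- ===== LEMMAS AND PROOFS =====

def acfFin (st : String × Bool) : String := if st.2 then st.1 ++ "</ul>" else st.1

set_option maxHeartbeats 1000000 in
theorem acfStepA_prefix (st : String × Bool) (l : String) :
    acfStepA st l = (st.1 ++ (acfStepA ("", st.2) l).1, (acfStepA ("", st.2) l).2) := by
  obtain ⟨a, b⟩ := st
  by_cases hi : PySem.Str.startswith (PySem.Str.strip l) "- " = true <;>
    cases b <;>
      simp only [acfStepA, hi, Bool.false_eq_true, if_true, if_false,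
        Bool.not_true, Bool.not_false] <;>
      first
        | (split_ifs <;>
            simp [String.append_assoc, String.empty_append])
        | simp [String.append_assoc, String.empty_append]

theorem acfFoldA_prefix (lines : List String) (st : String × Bool) :
    lines.foldl acfStepA st
      = (st.1 ++ (lines.foldl acfStepA ("", st.2)).1, (lines.foldl acfStepA ("", st.2)).2) := by
  induction lines generalizing st with
  | nil => simp
  | cons l rest ih =>
    rw [List.foldl_cons, List.foldl_cons, ih (acfStepA st l), ih (acfStepA ("", st.2) l),
        acfStepA_prefix st l]
    simp [String.append_assoc]

theorem acfFin_prefix (a x : String) (b : Bool) :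
    acfFin (a ++ x, b) = a ++ acfFin (x, b) := by
  cases b <;> simp [acfFin, String.append_assoc]

set_option maxHeartbeats 1000000 in
theorem acfStepA_item_t (l : String) (h : acfIsItem l = true) :
    acfStepA ("", true) l = (acfLiB l, true) := by
  unfold acfIsItem at h
  simp only [acfStepA, h, if_true]
  simp [acfLiB, String.empty_append]

set_option maxHeartbeats 1000000 in
theorem acfStepA_item_f (l : String) (h : acfIsItem l = true) :
    acfStepA ("", false) l
      = ("<ul style='list-style:none;padding-left:0;'>" ++ acfLiB l, true) := by
  unfold acfIsItem at h
  simp only [acfStepA, h, if_true]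
  simp [acfLiB, String.append_assoc, String.empty_append]

set_option maxHeartbeats 1000000 in
theorem acfStepA_non_t (l : String) (h : acfIsItem l = false) :
    acfStepA ("", true) l = ("</ul>" ++ acfBlockB l, false) := by
  unfold acfIsItem at h
  simp only [acfStepA, acfBlockB, h, Bool.false_eq_true, if_false, if_true]
  split_ifs <;>
    simp [String.append_assoc, String.empty_append]

set_option maxHeartbeats 1000000 in
theorem acfStepA_non_f (l : String) (h : acfIsItem l = false) :
    acfStepA ("", false) l = (acfBlockB l, false) := by
  unfold acfIsItem at h
  simp only [acfStepA, acfBlockB, h, Bool.false_eq_true, if_false]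
  split_ifs <;>
    simp [String.append_assoc, String.empty_append]

theorem acfTrueMode (lines : List String) :
    acfFin (lines.foldl acfStepA ("", true))
      = acfConcat ((lines.takeWhile acfIsItem).map acfLiB)
        ++ ("</ul>" ++ acfFin ((lines.dropWhile acfIsItem).foldl acfStepA ("", false))) := by
  induction lines with
  | nil => simp [acfFin, acfConcat]
  | cons l rest ih =>
    by_cases h : acfIsItem l = true
    · simp only [List.foldl_cons, acfStepA_item_t l h,
        List.takeWhile_cons, List.dropWhile_cons, h, if_true, List.map_cons, acfConcat]
      rw [acfFoldA_prefix rest (acfLiB l, true), acfFin_prefix, ih]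
      simp [String.append_assoc]
    · have h' : acfIsItem l = false := by simpa using h
      simp only [List.foldl_cons, acfStepA_non_t l h',
        List.takeWhile_cons, List.dropWhile_cons, h', Bool.false_eq_true, if_false,
        List.map_nil, acfConcat, acfStepA_non_f l h']
      rw [acfFoldA_prefix rest ("</ul>" ++ acfBlockB l, false), acfFin_prefix,
          acfFoldA_prefix rest (acfBlockB l, false), acfFin_prefix]
      simp [String.append_assoc]

theorem acfFalseMode (lines : List String) :
    acfFin (lines.foldl acfStepA ("", false)) = acfGoB lines := by
  induction lines using acfGoB.induct with
  | case1 => simp [acfFin, acfGoB]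
  | case2 l rest h ih =>
    simp only [List.dropWhile_cons, h, if_true] at ih
    simp only [List.foldl_cons, acfStepA_item_f l h]
    rw [acfFoldA_prefix rest _, acfFin_prefix, acfTrueMode, ih]
    rw [acfGoB]
    simp only [h, if_true, List.takeWhile_cons, List.dropWhile_cons, List.map_cons, acfConcat]
    simp [String.append_assoc]
  | case3 l rest h ih =>
    have h' : acfIsItem l = false := by simpa using h
    simp only [List.foldl_cons, acfStepA_non_f l h']
    rw [acfFoldA_prefix rest _, acfFin_prefix, ih, acfGoB]
    simp [h']

-- ===== VERDICT (by name: the statement is the Claim_ definition above) =====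
theorem apply_clean_format_spec : Claim_equal_apply_clean_format := by
  intro text _
  show apply_clean_format text = apply_clean_format_alt text
  simp only [apply_clean_format, apply_clean_format_alt]
  exact acfFalseMode _
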